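-- pv_equiv track=rewrite | github.com/rickmunoz92/trading-bot-v2 | adapters.py | _is_crypto_symbol
-- ===== SOURCE A (Python) =====
-- def _normalize_symbol(symbol: str) -> str:
--     """Uppercase & strip separators, e.g. 'btc/usd' -> 'BTCUSD'."""
--     return symbol.replace("/", "").replace("-", "").upper().strip()
--
-- _FIAT_SUFFIXES = ("USD", "USDT", "USDC", "EUR")
--
-- _COMMON_CRYPTO_BASES = {
--     "BTC", "ETH", "SOL", "DOGE", "ADA", "LTC", "BCH", "AVAX", "MATIC", "SHIB",
--     "ETC", "XRP", "DOT", "LINK", "ATOM", "NEAR", "APT", "ARB", "OP", "PEPE",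
--     "TON", "SUI", "ALGO", "FIL", "ICP", "AAVE", "UNI"
-- }
--
-- def _is_crypto_symbol(symbol: str) -> bool:
--     """Heuristic to classify crypto pairs."""
--     if "/" in symbol:
--         return True
--     sn = _normalize_symbol(symbol)
--     for q in _FIAT_SUFFIXES:
--         if sn.endswith(q) and len(sn) > len(q):
--             base = sn[:-len(q)]
--             return base in _COMMON_CRYPTO_BASES
--     return False
-- ===== SOURCE B (Python) =====
-- _FIAT_SUFFIXES = ("USD", "USDT", "USDC", "EUR")
--
-- _COMMON_CRYPTO_BASES = {
--     "BTC", "ETH", "SOL", "DOGE", "ADA", "LTC", "BCH", "AVAX", "MATIC", "SHIB",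
--     "ETC", "XRP", "DOT", "LINK", "ATOM", "NEAR", "APT", "ARB", "OP", "PEPE",
--     "TON", "SUI", "ALGO", "FIL", "ICP", "AAVE", "UNI"
-- }
--
-- # Prebuilt index: every normalized symbol the heuristic accepts (108 pairs).
-- _VALID_PAIRS = frozenset(b + q for b in _COMMON_CRYPTO_BASES for q in _FIAT_SUFFIXES)
--
-- def _is_crypto_symbol(symbol: str) -> bool:
--     """Heuristic to classify crypto pairs."""
--     # normalize in one character pass (drop separators, uppercase), then one set lookup
--     sn = "".join(c.upper() for c in symbol if c not in "/-").strip()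
--     return "/" in symbol or sn in _VALID_PAIRS
-- ===== Notes on version B (the rewrite author's own statement) =====
-- stated objective: alternative
-- what changed: Replaces A's per-suffix endswith scan with base stripping by a single membership lookup of the normalized symbol in a precomputed set of all 108 accepted base+suffix pairs; normalization is a single character pass (filter separators, uppercase each char) instead of two replace passes plus upper.
import Mathlib
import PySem

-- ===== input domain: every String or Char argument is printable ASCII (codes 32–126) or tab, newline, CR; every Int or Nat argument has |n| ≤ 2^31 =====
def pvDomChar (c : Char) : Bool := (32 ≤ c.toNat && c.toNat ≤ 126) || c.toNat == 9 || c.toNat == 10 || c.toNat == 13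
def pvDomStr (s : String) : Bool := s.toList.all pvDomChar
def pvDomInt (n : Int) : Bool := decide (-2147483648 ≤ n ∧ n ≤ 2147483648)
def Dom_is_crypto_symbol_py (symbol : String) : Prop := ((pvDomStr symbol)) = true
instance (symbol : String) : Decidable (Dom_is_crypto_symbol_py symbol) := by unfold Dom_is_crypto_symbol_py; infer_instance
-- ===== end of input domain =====

-- B replaces A's suffix-scanning loop (endswith + per-suffix base stripping) with one
-- membership lookup into a precomputed set of all accepted normalized pairs, and
-- normalizes in a single character pass (objective: alternative).

-- ===== PORT A =====
-- module constants and helper (_FIAT_SUFFIXES, _COMMON_CRYPTO_BASES, _normalize_symbol)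
def pvFiatSuffixes : List (List Char) := ["USD".toList, "USDT".toList, "USDC".toList, "EUR".toList]

def pvCryptoBases : PySem.Set (List Char) := PySem.Set.ofList
  ["BTC".toList, "ETH".toList, "SOL".toList, "DOGE".toList, "ADA".toList, "LTC".toList,
   "BCH".toList, "AVAX".toList, "MATIC".toList, "SHIB".toList, "ETC".toList, "XRP".toList,
   "DOT".toList, "LINK".toList, "ATOM".toList, "NEAR".toList, "APT".toList, "ARB".toList,
   "OP".toList, "PEPE".toList, "TON".toList, "SUI".toList, "ALGO".toList, "FIL".toList,
   "ICP".toList, "AAVE".toList, "UNI".toList]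

-- _normalize_symbol: replace('/',''), replace('-',''), upper(), strip()
def pvNormalize (symbol : String) : List Char :=
  PySem.Chars.strip (PySem.Chars.upper
    (PySem.Chars.replace (PySem.Chars.replace symbol.toList "/".toList "".toList) "-".toList "".toList))

-- A's 'for q in _FIAT_SUFFIXES' loop with its early returns
def pvSuffixLoop (sn : List Char) : List (List Char) → Bool
  | [] => false
  | q :: rest =>
    if PySem.Chars.endswith sn q && decide (q.length < sn.length) then
      PySem.Set.contains pvCryptoBases (PySem.List.slice sn none (some (-(q.length : Int))))
    else pvSuffixLoop sn rest

def is_crypto_symbol_py (symbol : String) : Bool :=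
  if PySem.Str.isIn "/" symbol then true
  else pvSuffixLoop (pvNormalize symbol) pvFiatSuffixes

-- ===== PORT B =====
-- _VALID_PAIRS = frozenset(b + q for b in _COMMON_CRYPTO_BASES for q in _FIAT_SUFFIXES)
def pvAltPairs : PySem.Set (List Char) :=
  PySem.Set.ofList
    ((["BTC", "ETH", "SOL", "DOGE", "ADA", "LTC", "BCH", "AVAX", "MATIC", "SHIB",
       "ETC", "XRP", "DOT", "LINK", "ATOM", "NEAR", "APT", "ARB", "OP", "PEPE",
       "TON", "SUI", "ALGO", "FIL", "ICP", "AAVE", "UNI"].map String.toList).flatMap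
      (fun b => (["USD", "USDT", "USDC", "EUR"].map String.toList).map (fun q => b ++ q)))

-- sn = "".join(c.upper() for c in symbol if c not in "/-").strip();  "/" in symbol or sn in _VALID_PAIRS
def is_crypto_symbol_py_alt (symbol : String) : Bool :=
  PySem.Str.isIn "/" symbol ||
    PySem.Set.contains pvAltPairs
      (PySem.Chars.strip
        ((symbol.toList.filter (fun c => !(c == '/' || c == '-'))).map PySem.Chars.upperChar))

-- ===== PRECONDITION & SPEC =====
def Spec_is_crypto_symbol_py (symbol : String) (out : Bool) : Prop := out = is_crypto_symbol_py_alt symbol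
instance (symbol : String) (out : Bool) : Decidable (Spec_is_crypto_symbol_py symbol out) := by unfold Spec_is_crypto_symbol_py; infer_instance

-- ===== CLAIM (what is proved, stated in full; the proofs are below) =====
def Claim_equal_is_crypto_symbol_py : Prop := ∀ (symbol : String), Dom_is_crypto_symbol_py symbol → Spec_is_crypto_symbol_py symbol (is_crypto_symbol_py symbol)

-- ===== LEMMAS AND PROOFS =====

-- replace of a single character by the empty string is a filter
lemma pv_replace_go_filter (c : Char) (l acc : List Char) (n : Nat) (hn : l.length ≤ n) :
    PySem.Chars.replace.go [c] [] n l acc = acc.reverse ++ l.filter (fun a => !(a == c)) := by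
  induction n generalizing l acc with
  | zero =>
    cases l with
    | nil => simp [PySem.Chars.replace.go]
    | cons x t => simp at hn
  | succ m ih =>
    cases l with
    | nil => simp [PySem.Chars.replace.go]
    | cons x t =>
      simp only [List.length_cons] at hn
      by_cases hx : x = c
      · subst hx
        have hpre : List.isPrefixOf [x] (x :: t) = true := by
          simp [List.isPrefixOf]
        simp only [PySem.Chars.replace.go, hpre, if_pos]
        rw [show List.drop (List.length [x]) (x :: t) = t by simp,
            show (([] : List Char).reverse ++ acc) = acc by simp]
        rw [ih t acc (by omega)]
        simp
      · have hpre : List.isPrefixOf [c] (x :: t) = false := by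
          simp [List.isPrefixOf]
          intro h; exact absurd h.symm hx
        simp only [PySem.Chars.replace.go, hpre, Bool.false_eq_true, if_neg, not_false_iff]
        rw [ih t (x :: acc) (by omega)]
        simp [hx]

lemma pv_replace_single (c : Char) (l : List Char) :
    PySem.Chars.replace l [c] [] = l.filter (fun a => !(a == c)) := by
  simp only [PySem.Chars.replace, List.isEmpty_cons, Bool.false_eq_true, if_neg, not_false_iff]
  exact pv_replace_go_filter c l [] l.length (le_refl _)

-- A's chained normalization equals B's single filter-and-map pass
lemma pv_normalize_eq (symbol : String) :
    pvNormalize symbol =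
      PySem.Chars.strip
        ((symbol.toList.filter (fun c => !(c == '/' || c == '-'))).map PySem.Chars.upperChar) := by
  unfold pvNormalize
  rw [show ("/" : String).toList = ['/'] from rfl, show ("-" : String).toList = ['-'] from rfl,
      show ("" : String).toList = [] from rfl]
  rw [pv_replace_single, pv_replace_single, List.filter_filter]
  congr 2
  apply List.filter_congr
  intro a _
  simp [Bool.not_or, Bool.and_comm]

-- stripping a suffix of known length with a negative stop index leaves exactly the base
lemma pv_slice_drop_suffix (b q : List Char) (hq : 0 < q.length) :
    PySem.List.slice (b ++ q) none (some (-(q.length : Int))) = b := by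
  have hc := PySem.List.clampIdx_neg_natCast (n := (b ++ q).length) (k := q.length) hq
  simp only [List.length_append] at hc
  simp [PySem.List.slice, hc]

lemma pv_mem_altPairs (sn : List Char) :
    sn ∈ pvAltPairs ↔ ∃ b ∈ pvCryptoBases, ∃ q ∈ pvFiatSuffixes, sn = b ++ q := by
  have hbases : (["BTC", "ETH", "SOL", "DOGE", "ADA", "LTC", "BCH", "AVAX", "MATIC", "SHIB",
       "ETC", "XRP", "DOT", "LINK", "ATOM", "NEAR", "APT", "ARB", "OP", "PEPE",
       "TON", "SUI", "ALGO", "FIL", "ICP", "AAVE", "UNI"].map String.toList)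
      = (pvCryptoBases : List (List Char)) := by decide
  have hsufs : (["USD", "USDT", "USDC", "EUR"].map String.toList) = pvFiatSuffixes := by decide
  have hmem : ∀ b, b ∈ (pvCryptoBases : List (List Char)) ↔ b ∈ pvCryptoBases := by
    intro b
    simp [pvCryptoBases, PySem.Set.mem_ofList]
  constructor
  · intro h
    simp only [pvAltPairs, PySem.Set.mem_ofList, hbases, hsufs] at h
    obtain ⟨b, hb, hsn⟩ := List.mem_flatMap.mp h
    obtain ⟨q, hq, rfl⟩ := List.mem_map.mp hsn
    exact ⟨b, (hmem b).mp hb, q, hq, rfl⟩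
  · rintro ⟨b, hb, q, hq, rfl⟩
    simp only [pvAltPairs, PySem.Set.mem_ofList, hbases, hsufs]
    exact List.mem_flatMap.mpr ⟨b, (hmem b).mpr hb, List.mem_map.mpr ⟨q, hq, rfl⟩⟩

lemma pv_bases_pos : ∀ b ∈ pvCryptoBases, 0 < b.length := by decide

-- suffix checks earlier in A's loop cannot fire for a string carrying a later suffix
lemma pv_endswith_false_short (b q q' : List Char) (hlen : q'.length ≤ q.length) (hns : ¬ q' <:+ q) :
    PySem.Chars.endswith (b ++ q) q' = false := by
  rw [Bool.eq_false_iff]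
  intro h
  exact hns (List.suffix_of_suffix_length_le ((PySem.Chars.endswith_iff _ _).mp h)
    (List.suffix_append b q) hlen)

lemma pv_endswith_false_long (b q q' : List Char) (hlen : q.length ≤ q'.length) (hns : ¬ q <:+ q') :
    PySem.Chars.endswith (b ++ q) q' = false := by
  rw [Bool.eq_false_iff]
  intro h
  exact hns (List.suffix_of_suffix_length_le (List.suffix_append b q)
    ((PySem.Chars.endswith_iff _ _).mp h) hlen)

-- the passing branch of A's loop, for the suffix sn actually carries
lemma pv_step_true (b q : List Char) (hb : b ∈ pvCryptoBases) (hq : 0 < q.length) :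
    (PySem.Chars.endswith (b ++ q) q && decide (q.length < (b ++ q).length)) = true ∧
    PySem.Set.contains pvCryptoBases (PySem.List.slice (b ++ q) none (some (-(q.length : Int)))) = true := by
  have hpos := pv_bases_pos b hb
  refine ⟨?_, ?_⟩
  · simp only [Bool.and_eq_true, decide_eq_true_eq, List.length_append]
    exact ⟨(PySem.Chars.endswith_iff _ _).mpr (List.suffix_append b q), by omega⟩
  · rw [pv_slice_drop_suffix b q hq, PySem.Set.contains_iff]
    exact hb

lemma pv_loop_of_mem (sn : List Char) (h : sn ∈ pvAltPairs) :
    pvSuffixLoop sn pvFiatSuffixes = true := by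
  obtain ⟨b, hb, q, hq, rfl⟩ := (pv_mem_altPairs sn).mp h
  simp only [pvFiatSuffixes, List.mem_cons, List.not_mem_nil, or_false] at hq
  rcases hq with rfl | rfl | rfl | rfl
  · obtain ⟨h1, h2⟩ := pv_step_true b "USD".toList hb (by decide)
    simp only [pvFiatSuffixes, pvSuffixLoop]
    rw [if_pos h1]; exact h2
  · obtain ⟨h1, h2⟩ := pv_step_true b "USDT".toList hb (by decide)
    simp only [pvFiatSuffixes, pvSuffixLoop]
    rw [if_neg (by simp [pv_endswith_false_short b ['U','S','D','T'] ['U','S','D'] (by decide) (by decide)]),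
        if_pos h1]
    exact h2
  · obtain ⟨h1, h2⟩ := pv_step_true b "USDC".toList hb (by decide)
    simp only [pvFiatSuffixes, pvSuffixLoop]
    rw [if_neg (by simp [pv_endswith_false_short b ['U','S','D','C'] ['U','S','D'] (by decide) (by decide)]),
        if_neg (by simp [pv_endswith_false_short b ['U','S','D','C'] ['U','S','D','T'] (by decide) (by decide)]),
        if_pos h1]
    exact h2
  · obtain ⟨h1, h2⟩ := pv_step_true b "EUR".toList hb (by decide)
    simp only [pvFiatSuffixes, pvSuffixLoop]
    rw [if_neg (by simp [pv_endswith_false_short b ['E','U','R'] ['U','S','D'] (by decide) (by decide)]),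
        if_neg (by simp [pv_endswith_false_long b ['E','U','R'] ['U','S','D','T'] (by decide) (by decide)]),
        if_neg (by simp [pv_endswith_false_long b ['E','U','R'] ['U','S','D','C'] (by decide) (by decide)]),
        if_pos h1]
    exact h2

lemma pv_mem_of_branch (sn q : List Char) (hqmem : q ∈ pvFiatSuffixes)
    (hcond : (PySem.Chars.endswith sn q && decide (q.length < sn.length)) = true)
    (hbase : PySem.Set.contains pvCryptoBases (PySem.List.slice sn none (some (-(q.length : Int)))) = true) :
    sn ∈ pvAltPairs := by
  have hq : 0 < q.length := by
    fin_cases hqmem <;> decide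
  simp only [Bool.and_eq_true, decide_eq_true_eq] at hcond
  obtain ⟨t, rfl⟩ := (PySem.Chars.endswith_iff _ _).mp hcond.1
  rw [pv_slice_drop_suffix t q hq, PySem.Set.contains_iff] at hbase
  exact (pv_mem_altPairs _).mpr ⟨t, hbase, q, hqmem, rfl⟩

lemma pv_loop_eq_contains (sn : List Char) :
    pvSuffixLoop sn pvFiatSuffixes = PySem.Set.contains pvAltPairs sn := by
  by_cases hm : sn ∈ pvAltPairs
  · rw [pv_loop_of_mem sn hm, eq_comm, PySem.Set.contains_iff]
    exact hm
  · have hc : PySem.Set.contains pvAltPairs sn = false := by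
      rw [Bool.eq_false_iff]; intro h; exact hm ((PySem.Set.contains_iff _ _).mp h)
    rw [hc, Bool.eq_false_iff]
    intro hloop
    apply hm
    simp only [pvSuffixLoop, pvFiatSuffixes] at hloop
    split_ifs at hloop with h1 h2 h3 h4
    · exact pv_mem_of_branch sn "USD".toList (by decide) h1 hloop
    · exact pv_mem_of_branch sn "USDT".toList (by decide) h2 hloop
    · exact pv_mem_of_branch sn "USDC".toList (by decide) h3 hloop
    · exact pv_mem_of_branch sn "EUR".toList (by decide) h4 hloop

-- ===== VERDICT (by name: the statement is the Claim_ definition above) =====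
theorem is_crypto_symbol_py_spec : Claim_equal_is_crypto_symbol_py := by
  intro symbol _
  unfold Spec_is_crypto_symbol_py is_crypto_symbol_py is_crypto_symbol_py_alt
  by_cases h : PySem.Str.isIn "/" symbol = true
  · rw [if_pos h, h, Bool.true_or]
  · rw [if_neg h, Bool.eq_false_iff.mpr h, Bool.false_or, ← pv_normalize_eq]
    exact pv_loop_eq_contains _
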